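-- pv_equiv track=rewrite | github.com/SergioSET/Proyecto-I-ADA-II | estrategiaFuerzaBruta.py | estrategiaFuerzaBruta
-- ===== SOURCE A (Python) =====
-- def estrategiaFuerzaBruta(A: int, B: int, n: int, ofertas: tuple):
--     asignacion = tuple
--     asignaciones = tuple
--
--     # une la asignacion recibida a cada asignacion de la tupla recibida
--     def productoCartElemento(element: asignacion, tupla: asignaciones) -> asignaciones:
--         return tuple(element + element2 for element2 in tupla)
--
--     # calcula el valor de la asignacion de acciones recibida como parametro
--     def valorAsig(asignacion: tuple[int]):
--         resultado = 0
--         for i, cantAcciones in enumerate(asignacion):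
--             resultado += cantAcciones * ofertas[i][0]
--         return resultado
--
--     def licitacion(A: int, B: int, n: int, ofertas: tuple) -> asignaciones:
--         p, c, r = ofertas[0]
--
--         def noIncluirOfertaActual() -> asignaciones:
--             return productoCartElemento((0,), licitacion(A, B, n - 1, ofertas[1:]))
--
--         def incluirOfertaActual() -> asignaciones:
--             return productoCartElemento((c,), licitacion(A-c, B, n - 1, ofertas[1:]))
--
--         if n == 0:
--             return ((A,),)
--         elif A >= c:
--             return noIncluirOfertaActual() + incluirOfertaActual()
--         else:
--             return noIncluirOfertaActual()
--
--     soluciones = licitacion(A, B, n, ofertas)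
--     valorSoluciones = map(valorAsig, soluciones)
--     pos, maxValor = 0, A * B
--     for indice, valor in enumerate(valorSoluciones):
--         if valor > maxValor:
--             pos, maxValor = indice, valor
--     return soluciones
-- ===== SOURCE B (Python) =====
-- def estrategiaFuerzaBruta(A: int, B: int, n: int, ofertas: tuple):
--     # Iterative worklist instead of recursion: consume exactly n offers
--     # (n counts the offers to decide on, as in A's n == 0 base case);
--     # A's dead pos/maxValor scan is dropped.
--     pairs = [((), A)]
--     i = 0
--     while i != n:
--         p, c, r = ofertas[i]
--         nxt = []
--         for partial, rem in pairs:
--             nxt.append((partial + (0,), rem))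
--             if rem >= c:
--                 nxt.append((partial + (c,), rem - c))
--         pairs = nxt
--         i += 1
--     return tuple(partial + (rem,) for partial, rem in pairs)
-- ===== Notes on version B (the rewrite author's own statement) =====
-- stated objective: simpler
-- what changed: Replaces the recursive licitacion (with nested closures and per-call tuple slicing) by a single iterative worklist pass that expands each (partial, remaining) pair per offer, skip branch before take branch, and drops A's dead pos/maxValor scan; same tuples in the same order.
import Mathlib
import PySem

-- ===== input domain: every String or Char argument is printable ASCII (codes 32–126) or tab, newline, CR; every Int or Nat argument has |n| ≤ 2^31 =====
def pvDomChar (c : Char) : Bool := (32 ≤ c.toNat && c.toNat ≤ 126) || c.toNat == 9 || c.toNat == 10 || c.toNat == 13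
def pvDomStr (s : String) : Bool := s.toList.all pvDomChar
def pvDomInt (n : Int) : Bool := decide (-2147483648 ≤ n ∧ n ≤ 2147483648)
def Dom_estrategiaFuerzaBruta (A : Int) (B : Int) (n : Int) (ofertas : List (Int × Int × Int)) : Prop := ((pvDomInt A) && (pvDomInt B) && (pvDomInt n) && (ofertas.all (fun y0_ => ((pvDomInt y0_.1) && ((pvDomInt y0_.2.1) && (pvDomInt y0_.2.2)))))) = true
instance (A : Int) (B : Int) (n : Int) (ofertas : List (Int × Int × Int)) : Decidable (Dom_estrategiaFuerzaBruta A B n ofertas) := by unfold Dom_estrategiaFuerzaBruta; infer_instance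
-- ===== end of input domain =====

-- B replaces A's recursive enumeration by an iterative worklist over the offers and drops
-- A's dead pos/maxValor scan (objective: simpler, same result and ordering).

-- ===== PORT A =====
-- productoCartElemento: prepend `element` to every assignment of `tupla`
def pvProductoCart (element : List Int) (tupla : List (List Int)) : List (List Int) :=
  tupla.map (fun element2 => element ++ element2)

-- valorAsig (dead code in A: its results are computed and discarded).
-- Under Pre_ every index i is in range, so the `.getD (0,0,0)` default (Python would raise
-- IndexError out of range) is never taken on admitted inputs.
def pvValorAsig (ofertas : List (Int × Int × Int)) (asig : List Int) : Int :=
  (PySem.List.enumerate asig).foldl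
    (fun resultado ic =>
      resultado + ic.2 * ((PySem.List.pyGet? ofertas ic.1).getD (0, 0, 0)).1) 0

-- licitacion; `none` = IndexError from `ofertas[0]` on an empty tuple (excluded by Pre_)
def pvLicitacion : Int → Int → Int → List (Int × Int × Int) → Option (List (List Int))
  | _, _, _, [] => none
  | B, A, n, (_, c, _) :: rest =>
    if n = 0 then some [[A]]
    else if A ≥ c then
      match pvLicitacion B A (n - 1) rest, pvLicitacion B (A - c) (n - 1) rest with
      | some xs, some ys => some (pvProductoCart [0] xs ++ pvProductoCart [c] ys)
      | _, _ => none
    else (pvLicitacion B A (n - 1) rest).map (pvProductoCart [0])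

def estrategiaFuerzaBruta (A : Int) (B : Int) (n : Int) (ofertas : List (Int × Int × Int)) : List (List Int) :=
  let soluciones := (pvLicitacion B A n ofertas).getD []   -- some _ on every input admitted by Pre_
  -- A's trailing pos/maxValor loop over map(valorAsig, soluciones): computed and discarded
  let valorSoluciones := soluciones.map (pvValorAsig ofertas)
  let _ := (PySem.List.enumerate valorSoluciones).foldl
    (fun pm iv => if iv.2 > pm.2 then (iv.1, iv.2) else pm) ((0 : Int), A * B)
  soluciones

-- ===== PORT B =====
-- one step of the worklist: expand every (partial, rem) pair in place, skip branch first
def pvStep (pairs : List (List Int × Int)) (pcr : Int × Int × Int) : List (List Int × Int) :=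
  pairs.flatMap (fun pr =>
    (pr.1 ++ [0], pr.2) ::
      (if pr.2 ≥ pcr.2.1 then [(pr.1 ++ [pcr.2.1], pr.2 - pcr.2.1)] else []))

-- the `while i != n` loop: unpack ofertas[i] (none = IndexError), expand, advance i.
-- i only ever takes the values 0, 1, 2, … so it is carried as a Nat (same values as the
-- Python counter); on a Python run that never meets i == n the loop ends in the IndexError
-- at i = len(ofertas), which is the `none` of the second match arm here.
def pvWhile (ofertas : List (Int × Int × Int)) (n : Int) (i : Nat) (st : Option (List (List Int × Int))) : Option (List (List Int × Int)) :=
  if (i : Int) = n then st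
  else
    match h : PySem.List.pyGet? ofertas (i : Int) with
    | none => none
    | some pcr =>
      match st with
      | none => none
      | some pairs => pvWhile ofertas n (i + 1) (some (pvStep pairs pcr))
termination_by ofertas.length - i
decreasing_by
  have hi : i < ofertas.length := by
    rw [PySem.List.pyGet?_natCast] at h
    exact (List.getElem?_eq_some_iff.mp h).1
  omega

def estrategiaFuerzaBruta_alt (A : Int) (B : Int) (n : Int) (ofertas : List (Int × Int × Int)) : List (List Int) :=
  let pairs := pvWhile ofertas n 0 (some [([], A)])
  (pairs.getD []).map (fun pr => pr.1 ++ [pr.2])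

-- ===== PRECONDITION & SPEC =====
-- Pre_ excludes exactly the inputs on which A raises IndexError: the recursion unpacks
-- ofertas[0] before testing n == 0, so A returns iff 0 ≤ n and n < len(ofertas).
def Pre_estrategiaFuerzaBruta (A : Int) (B : Int) (n : Int) (ofertas : List (Int × Int × Int)) : Prop :=
  0 ≤ n ∧ n < (ofertas.length : Int)
instance (A : Int) (B : Int) (n : Int) (ofertas : List (Int × Int × Int)) : Decidable (Pre_estrategiaFuerzaBruta A B n ofertas) := by unfold Pre_estrategiaFuerzaBruta; infer_instance

def pvWitness_estrategiaFuerzaBruta : Int × Int × Int × (List (Int × Int × Int)) :=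
  (5, 1, 1, [(3, 2, 1), (4, 1, 2)])

def Spec_estrategiaFuerzaBruta (A : Int) (B : Int) (n : Int) (ofertas : List (Int × Int × Int)) (out : List (List Int)) : Prop := out = estrategiaFuerzaBruta_alt A B n ofertas
instance (A : Int) (B : Int) (n : Int) (ofertas : List (Int × Int × Int)) (out : List (List Int)) : Decidable (Spec_estrategiaFuerzaBruta A B n ofertas out) := by unfold Spec_estrategiaFuerzaBruta; infer_instance

-- ===== CLAIM (what is proved, stated in full; the proofs are below) =====
def Claim_equal_estrategiaFuerzaBruta : Prop := ∀ (A : Int) (B : Int) (n : Int) (ofertas : List (Int × Int × Int)), Dom_estrategiaFuerzaBruta A B n ofertas → Pre_estrategiaFuerzaBruta A B n ofertas → Spec_estrategiaFuerzaBruta A B n ofertas (estrategiaFuerzaBruta A B n ofertas)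


-- ===== LEMMAS AND PROOFS =====

-- the common reference enumeration (proof device only)
def pvEnum (A : Int) : List (Int × Int × Int) → List (List Int)
  | [] => [[A]]
  | (_, c, _) :: rest =>
      (pvEnum A rest).map (fun e => [0] ++ e) ++
      (if A ≥ c then (pvEnum (A - c) rest).map (fun e => [c] ++ e) else [])

theorem pvLicitacion_eq (B : Int) :
    ∀ (ofertas : List (Int × Int × Int)) (A n : Int), 0 ≤ n → n < (ofertas.length : Int) →
      pvLicitacion B A n ofertas = some (pvEnum A (ofertas.take n.toNat)) := by
  intro ofertas
  induction ofertas with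
  | nil => intro A n h0 hlt; simp at hlt; omega
  | cons head rest ih =>
    intro A n h0 hlt
    obtain ⟨p, c, r⟩ := head
    by_cases hn : n = 0
    · subst hn; simp [pvLicitacion, pvEnum]
    · have h0' : 0 ≤ n - 1 := by omega
      have hlt' : n - 1 < (rest.length : Int) := by simp at hlt ⊢; omega
      have htn : n.toNat = (n - 1).toNat + 1 := by omega
      rw [htn]
      simp only [List.take_succ_cons]
      by_cases hc : A ≥ c
      · simp [pvLicitacion, hn, hc, ih A (n - 1) h0' hlt', ih (A - c) (n - 1) h0' hlt',
          pvEnum, pvProductoCart]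
      · simp [pvLicitacion, hn, hc, ih A (n - 1) h0' hlt', pvEnum, pvProductoCart]

theorem pvFoldl_enum :
    ∀ (l : List (Int × Int × Int)) (pairs : List (List Int × Int)),
      (l.foldl pvStep pairs).map (fun pr => pr.1 ++ [pr.2])
        = pairs.flatMap (fun pr => (pvEnum pr.2 l).map (fun e => pr.1 ++ e)) := by
  intro l
  induction l with
  | nil =>
    intro pairs
    simp only [List.foldl_nil, pvEnum]
    induction pairs with
    | nil => simp
    | cons x ps ihp => simp_all
  | cons pcr rest ih =>
    intro pairs
    rw [List.foldl_cons, ih, pvStep, List.flatMap_assoc]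
    congr 1
    funext pr
    obtain ⟨part, rem⟩ := pr
    obtain ⟨p, c, r⟩ := pcr
    by_cases hc : rem ≥ c
    · simp [pvEnum, hc, List.map_map, Function.comp_def, List.append_assoc]
    · simp [pvEnum, hc, List.map_map, Function.comp_def, List.append_assoc]

-- the while loop succeeds and equals the structural fold over the m offers from index i
theorem pvWhile_fold (ofertas : List (Int × Int × Int)) (n : Int) :
    ∀ (m i : Nat) (pairs : List (List Int × Int)), (i : Int) + m = n → i + m ≤ ofertas.length →
      pvWhile ofertas n i (some pairs)
        = some (((ofertas.drop i).take m).foldl pvStep pairs) := by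
  intro m
  induction m with
  | zero =>
    intro i pairs hn _
    rw [pvWhile, if_pos (by omega)]
    simp
  | succ m ih =>
    intro i pairs hn hlen
    have hi : i < ofertas.length := by omega
    have hget : PySem.List.pyGet? ofertas (i : Int) = some (ofertas[i]'hi) := by
      rw [PySem.List.pyGet?_natCast]; exact List.getElem?_eq_getElem _
    have hdrop : ofertas.drop i = ofertas[i]'hi :: ofertas.drop (i + 1) :=
      (List.getElem_cons_drop hi).symm
    rw [pvWhile, if_neg (by omega), hdrop]
    simp only [List.take_succ_cons, List.foldl_cons]
    split
    next heq => rw [hget] at heq; exact absurd heq (by simp)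
    next pcr heq =>
      rw [hget] at heq
      injection heq with heq'
      subst heq'
      exact ih (i + 1) (pvStep pairs (ofertas[i]'hi)) (by push_cast; omega) (by omega)

-- ===== VERDICT (by name: the statement is the Claim_ definition above) =====
theorem estrategiaFuerzaBruta_spec : Claim_equal_estrategiaFuerzaBruta := by
  intro A B n ofertas _ hpre
  obtain ⟨h0, hlt⟩ := hpre
  show estrategiaFuerzaBruta A B n ofertas = estrategiaFuerzaBruta_alt A B n ofertas
  rw [estrategiaFuerzaBruta, estrategiaFuerzaBruta_alt,
    pvLicitacion_eq B ofertas A n h0 hlt,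
    pvWhile_fold ofertas n n.toNat 0 _ (by omega) (by omega)]
  simp only [List.drop_zero]
  simp only [Option.getD_some]
  rw [pvFoldl_enum]
  simp
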